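-- pv_equiv track=rewrite | github.com/Palaciolol/Laboratorios-MC102 | lab 6/lab06.py | produto_interno
-- ===== SOURCE A (Python) =====
-- def multiplica_vetores(vetor1: list[int], vetor2: list[int]) -> list[int]:
--     '''Dadas duas listas de inteiros, multiplica elemento a elemento das listas
--
--     Parâmetros:
--     vetor1--lista de inteiros
--     vetor2--lista de inteiros
--     '''
--
--     multiplica_zip = zip(vetor1, vetor2)
--     multiplicacao = []
--
--     if len(vetor1) == len(vetor2):
--         for x, y in multiplica_zip:
--             multiplicacao.append(x*y)
--
--     elif len(vetor1) > len(vetor2):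
--         for i in range(0, len(vetor1) - len(vetor2)):
--             vetor2.append(1)
--
--         for x, y in multiplica_zip:
--             multiplicacao.append(x*y)
--
--     elif len(vetor2) > len(vetor1):
--         for i in range(0, len(vetor2) - len(vetor1)):
--             vetor1.append(1)
--
--         for x, y in multiplica_zip:
--             multiplicacao.append(x*y)
--
--     return multiplicacao
--
-- def soma_elementos(vetor: list[int]) -> int:
--     '''Dada uma lista de inteiros, soma todos os elementos da lista
--
--     Parâmetros :
--     vetor--lista de inteiros
--     '''
--
--     soma_tudo = 0
--     for x in range(0, len(vetor)):
--         soma_tudo += vetor[x]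
--
--     return soma_tudo
--
-- def produto_interno(vetor1: list[int], vetor2: list[int]) -> int:
--     '''Dadas duas listas de inteiros, soma a multiplicacão elemento a elemento
--     das listas
--     Parâmetros :
--     vetor1--listta de inteiros
--     vetor2--lista de inteiros
--     '''
--
--     if len(vetor1) > len(vetor2):
--         for i in range(0, len(vetor1) - len(vetor2)):
--             vetor2.append(1)
--
--         r1 = soma_elementos(multiplica_vetores(vetor1, vetor2))
--
--     elif len(vetor2) > len(vetor1):
--         for i in range(0, len(vetor2) - len(vetor1)):
--             vetor1.append(1)
--
--         r1 = soma_elementos(multiplica_vetores(vetor1, vetor2))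
--
--     elif len(vetor1) == len(vetor2):
--         r1 = soma_elementos(multiplica_vetores(vetor1, vetor2))
--
--     return r1
-- ===== SOURCE B (Python) =====
-- def produto_interno(vetor1, vetor2):
--     # One fused pass: sum of pairwise products over the common prefix, plus the
--     # leftover elements of the longer list (padding with 1s makes each extra
--     # element contribute itself).  No padding, no intermediate product list.
--     # Note: unlike A, B does not mutate its arguments; the equivalence claimed
--     # is about the return value only.
--     n = min(len(vetor1), len(vetor2))
--     total = 0
--     for x, y in zip(vetor1, vetor2):
--         total += x * y
--     for x in vetor1[n:]:
--         total += x
--     for x in vetor2[n:]: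
--         total += x
--     return total
-- ===== Notes on version B (the rewrite author's own statement) =====
-- stated objective: simpler
-- what changed: A pads the shorter list in place with 1s, builds an intermediate list of pairwise products, then sums it with an index loop; B does neither: one fused zip pass accumulates the products and the leftover tail of the longer list is added directly (x*1 = x), with no mutation and no intermediate list.
import Mathlib
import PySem

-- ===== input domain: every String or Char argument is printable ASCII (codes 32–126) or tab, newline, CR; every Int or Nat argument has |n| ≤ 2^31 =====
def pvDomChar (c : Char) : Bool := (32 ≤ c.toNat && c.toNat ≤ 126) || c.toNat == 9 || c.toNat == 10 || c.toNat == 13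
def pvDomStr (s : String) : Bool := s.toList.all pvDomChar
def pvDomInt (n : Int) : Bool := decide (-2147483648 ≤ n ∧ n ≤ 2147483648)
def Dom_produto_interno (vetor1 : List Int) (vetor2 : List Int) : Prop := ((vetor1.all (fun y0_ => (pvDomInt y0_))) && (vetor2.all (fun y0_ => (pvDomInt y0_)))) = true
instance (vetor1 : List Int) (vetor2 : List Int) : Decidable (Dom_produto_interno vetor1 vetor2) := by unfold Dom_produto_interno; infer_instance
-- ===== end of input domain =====

-- B fuses A's pad/multiply-into-a-list/sum pipeline into one accumulating zip pass plus the
-- leftover tail of the longer list (objective: simpler). A mutates the shorter argument in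
-- place (pads it with 1s); B does not — the equivalence proved is about the return value only.

-- ===== PORT A =====
-- helper soma_elementos: index loop summing v[x] (index always in range, default never used)
def soma_elementos (v : List Int) : Int :=
  (PySem.List.pyRange 0 (v.length : Int) 1).foldl (fun s x => s + PySem.List.pyGetD v x 0) 0

-- helper multiplica_vetores: the Python zip is lazy, so in the padding branches it iterates
-- over the already-appended list; the append is modelled by ++ List.replicate.
def multiplica_vetores (v1 : List Int) (v2 : List Int) : List Int :=
  if v1.length = v2.length then
    (v1.zip v2).foldl (fun acc p => acc ++ [p.1 * p.2]) []
  else if v1.length > v2.length then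
    let v2' := v2 ++ List.replicate (v1.length - v2.length) 1
    (v1.zip v2').foldl (fun acc p => acc ++ [p.1 * p.2]) []
  else
    let v1' := v1 ++ List.replicate (v2.length - v1.length) 1
    (v1'.zip v2).foldl (fun acc p => acc ++ [p.1 * p.2]) []

def produto_interno (vetor1 : List Int) (vetor2 : List Int) : Int :=
  if vetor1.length > vetor2.length then
    let v2' := vetor2 ++ List.replicate (vetor1.length - vetor2.length) 1
    soma_elementos (multiplica_vetores vetor1 v2')
  else if vetor2.length > vetor1.length then
    let v1' := vetor1 ++ List.replicate (vetor2.length - vetor1.length) 1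
    soma_elementos (multiplica_vetores v1' vetor2)
  else
    soma_elementos (multiplica_vetores vetor1 vetor2)

-- ===== PORT B =====
def produto_interno_alt (vetor1 : List Int) (vetor2 : List Int) : Int :=
  -- n = min(len(vetor1), len(vetor2)); three accumulating folds over total, fused as nesting
  (PySem.List.slice vetor2 (some ((min vetor1.length vetor2.length : Nat) : Int)) none).foldl
    (fun t x => t + x)
    ((PySem.List.slice vetor1 (some ((min vetor1.length vetor2.length : Nat) : Int)) none).foldl
      (fun t x => t + x)
      ((vetor1.zip vetor2).foldl (fun t p => t + p.1 * p.2) 0))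

-- ===== PRECONDITION & SPEC =====
def Spec_produto_interno (vetor1 : List Int) (vetor2 : List Int) (out : Int) : Prop := out = produto_interno_alt vetor1 vetor2
instance (vetor1 : List Int) (vetor2 : List Int) (out : Int) : Decidable (Spec_produto_interno vetor1 vetor2 out) := by unfold Spec_produto_interno; infer_instance

-- ===== CLAIM (what is proved, stated in full; the proofs are below) =====
def Claim_equal_produto_interno : Prop := ∀ (vetor1 : List Int) (vetor2 : List Int), Dom_produto_interno vetor1 vetor2 → Spec_produto_interno vetor1 vetor2 (produto_interno vetor1 vetor2)

-- ===== LEMMAS AND PROOFS =====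

theorem foldl_add_eq_sum (l : List Int) (c : Int) : l.foldl (fun t x => t + x) c = c + l.sum := by
  induction l generalizing c with
  | nil => simp
  | cons a as ih => simp [List.foldl, ih, add_assoc]

theorem foldl_addf_eq_sum (l : List (Int × Int)) (c : Int) :
    l.foldl (fun t p => t + p.1 * p.2) c = c + (l.map (fun p => p.1 * p.2)).sum := by
  induction l generalizing c with
  | nil => simp
  | cons a as ih => simp [List.foldl, ih, add_assoc]

theorem soma_eq_sum (v : List Int) : soma_elementos v = v.sum := by
  unfold soma_elementos
  rw [PySem.List.foldl_pyRange_zero_pyGetD' v 0 (fun s x => s + x) 0]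
  simpa using foldl_add_eq_sum v 0

theorem mult_eq_map (v1 v2 : List Int) (h : v1.length = v2.length) :
    multiplica_vetores v1 v2 = (v1.zip v2).map (fun p => p.1 * p.2) := by
  unfold multiplica_vetores
  rw [if_pos h, PySem.List.foldl_append_singleton_eq_map]
  simp

theorem zip_mul_comm (a b : List Int) :
    ((a.zip b).map (fun p => p.1 * p.2)).sum = ((b.zip a).map (fun p => p.1 * p.2)).sum := by
  induction a generalizing b with
  | nil => cases b <;> simp
  | cons x xs ih =>
    cases b with
    | nil => simp
    | cons y ys => simp [ih ys, mul_comm]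

theorem zip_replicate_one_sum (v : List Int) :
    ((v.zip (List.replicate v.length (1 : Int))).map (fun p => p.1 * p.2)).sum = v.sum := by
  induction v with
  | nil => simp
  | cons a as ih => simp [List.replicate, ih]

theorem zip_pad_sum (v2 v1 : List Int) (h : v2.length ≤ v1.length) :
    ((v1.zip (v2 ++ List.replicate (v1.length - v2.length) 1)).map (fun p => p.1 * p.2)).sum
      = ((v1.zip v2).map (fun p => p.1 * p.2)).sum + (v1.drop v2.length).sum := by
  induction v2 generalizing v1 with
  | nil => simpa using zip_replicate_one_sum v1
  | cons b bs ih =>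
    cases v1 with
    | nil => simp at h
    | cons a as =>
      simp only [List.length_cons, List.cons_append, List.zip_cons_cons, List.map_cons,
        List.sum_cons, List.drop_succ_cons] at *
      have := ih as (by omega)
      simp only [Nat.succ_sub_succ] at *
      rw [this]; ring

theorem slice_from_drop (v : List Int) (n : Nat) :
    PySem.List.slice v (some (n : Int)) none = v.drop n := by
  rw [PySem.List.slice_some_none, PySem.List.clampIdx_natCast]
  rcases Nat.le_total n v.length with h | h
  · simp [Nat.min_eq_left h]
  · simp [Nat.min_eq_right h, List.drop_eq_nil_of_le h]

theorem alt_eq (v1 v2 : List Int) :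
    produto_interno_alt v1 v2
      = ((v1.zip v2).map (fun p => p.1 * p.2)).sum
        + (v1.drop (min v1.length v2.length)).sum + (v2.drop (min v1.length v2.length)).sum := by
  unfold produto_interno_alt
  rw [slice_from_drop, slice_from_drop, foldl_add_eq_sum, foldl_add_eq_sum, foldl_addf_eq_sum]
  ring

-- ===== VERDICT (by name: the statement is the Claim_ definition above) =====
theorem produto_interno_spec : Claim_equal_produto_interno := by
  intro v1 v2 _
  unfold Spec_produto_interno produto_interno
  rw [alt_eq]
  by_cases h1 : v1.length > v2.length
  · rw [if_pos h1]
    have hlen : v1.length = (v2 ++ List.replicate (v1.length - v2.length) (1:Int)).length := by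
      simp; omega
    rw [soma_eq_sum, mult_eq_map _ _ hlen, zip_pad_sum v2 v1 (by omega)]
    have hmin : min v1.length v2.length = v2.length := by omega
    rw [hmin]
    have : v2.drop v2.length = [] := by simp
    simp [this]
  · rw [if_neg h1]
    by_cases h2 : v2.length > v1.length
    · rw [if_pos h2]
      have hlen : (v1 ++ List.replicate (v2.length - v1.length) (1:Int)).length = v2.length := by
        simp; omega
      rw [soma_eq_sum, mult_eq_map _ _ hlen]
      -- flip the zip to reuse zip_pad_sum
      have key : (((v1 ++ List.replicate (v2.length - v1.length) (1:Int)).zip v2).map (fun p : Int × Int => p.1 * p.2)).sum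
          = ((v2.zip (v1 ++ List.replicate (v2.length - v1.length) (1:Int))).map (fun p : Int × Int => p.1 * p.2)).sum := by
        exact zip_mul_comm _ _
      rw [key, zip_pad_sum v1 v2 (by omega)]
      have key2 : ((v2.zip v1).map (fun p : Int × Int => p.1 * p.2)).sum
          = ((v1.zip v2).map (fun p : Int × Int => p.1 * p.2)).sum := by
        exact zip_mul_comm _ _
      have hmin : min v1.length v2.length = v1.length := by omega
      rw [key2, hmin]
      have : v1.drop v1.length = [] := by simp
      simp [this]
    · rw [if_neg h2]
      have hlen : v1.length = v2.length := by omega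
      rw [soma_eq_sum, mult_eq_map _ _ hlen]
      have hmin : min v1.length v2.length = v1.length := by omega
      rw [hmin]
      have e1 : List.drop v1.length v1 = ([] : List Int) := by simp
      have e2 : List.drop v1.length v2 = ([] : List Int) := List.drop_eq_nil_of_le (by omega)
      simp [e1, e2]
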